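-- pv_equiv track=rewrite | github.com/markredito/settimegen | app.py | generate_corrected_schedule_with_times
-- ===== SOURCE A (Python) =====
-- def generate_corrected_schedule_with_times(preferences):
--     flattened_preferences = [(dj, rank, time) for dj, times in preferences.items() for rank, time in enumerate(times)]
--     sorted_preferences = sorted(flattened_preferences, key=lambda x: (x[1], x[2]))
--
--     # Set times based on the order
--     set_times = ["2:30 pm", "3:30 pm", "4:30 pm", "5:30 pm", "6:30 pm"]
--
--     # Ensuring each DJ is assigned only once
--     assigned_djs = set()
--     assigned_times = []
--     time_idx = 0
--     for x in sorted_preferences: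
--         if x[0] not in assigned_djs:
--             assigned_times.append(f"{x[0]} ({set_times[time_idx]})")
--             assigned_djs.add(x[0])
--             time_idx += 1
--     return [assigned_times]
-- ===== SOURCE B (Python) =====
-- def generate_corrected_schedule_with_times(preferences):
--     set_times = ["2:30 pm", "3:30 pm", "4:30 pm", "5:30 pm", "6:30 pm"]
--     # Each DJ's best (lowest-rank) preference is simply its first listed time:
--     # rank 0 beats every other rank, so only times[0] matters for the order.
--     firsts = [(dj, times[0]) for dj, times in preferences.items() if times]
--     firsts.sort(key=lambda p: p[1])  # stable: ties keep dict insertion order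
--     return [[f"{dj} ({set_times[i]})" for i, (dj, _) in enumerate(firsts)]]
-- ===== Notes on version B (the rewrite author's own statement) =====
-- stated objective: simpler
-- what changed: A flattens every (dj, rank, time) preference, stable-sorts them all by (rank, time) and dedupes DJs with a seen-set; B observes that rank 0 always wins, so it keeps one (dj, times[0]) pair per DJ with a non-empty list, stable-sorts those by time alone and formats them directly — no flattening, no dedupe loop.
import Mathlib
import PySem

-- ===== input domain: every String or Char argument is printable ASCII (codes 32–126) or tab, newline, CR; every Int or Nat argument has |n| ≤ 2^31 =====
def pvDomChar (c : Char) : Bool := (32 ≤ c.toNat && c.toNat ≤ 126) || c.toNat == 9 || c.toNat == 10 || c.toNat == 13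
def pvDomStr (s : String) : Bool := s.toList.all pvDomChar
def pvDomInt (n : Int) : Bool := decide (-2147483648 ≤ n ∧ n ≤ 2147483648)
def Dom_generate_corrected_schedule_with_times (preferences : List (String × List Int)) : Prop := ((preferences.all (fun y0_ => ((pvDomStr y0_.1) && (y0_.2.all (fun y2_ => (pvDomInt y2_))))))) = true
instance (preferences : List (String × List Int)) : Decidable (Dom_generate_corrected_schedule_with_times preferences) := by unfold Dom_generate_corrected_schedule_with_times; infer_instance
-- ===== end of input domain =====

-- B replaces A's flatten-all-ranks + global stable sort + dedupe by a direct stable sort of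
-- each DJ's first-listed time (rank 0 always wins), a simpler single-key sort of one pair per DJ.

-- ===== PORT A =====
def generate_corrected_schedule_with_times (preferences : List (String × List Int)) : List (List String) :=
  let flattened_preferences := preferences.flatMap (fun p => (PySem.List.enumerate p.2 0).map (fun rt => (p.1, rt.1, rt.2)))
  let sorted_preferences := PySem.List.sorted2 flattened_preferences (fun x => x.2.1) (fun x => x.2.2) false
  let set_times := ["2:30 pm", "3:30 pm", "4:30 pm", "5:30 pm", "6:30 pm"]
  -- for-loop state: (assigned_djs, assigned_times, time_idx); set_times[time_idx] is total pyGetD "" (exact under Pre_)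
  let st := sorted_preferences.foldl
    (fun (acc : PySem.Set String × List String × Int) x =>
      if PySem.Set.contains acc.1 x.1 then acc
      else (PySem.Set.add acc.1 x.1,
            acc.2.1 ++ [x.1 ++ " (" ++ PySem.List.pyGetD set_times acc.2.2 "" ++ ")"],
            acc.2.2 + 1))
    (PySem.Set.empty, ([] : List String), (0 : Int))
  [st.2.1]

-- ===== PORT B =====
def generate_corrected_schedule_with_times_alt (preferences : List (String × List Int)) : List (List String) :=
  let set_times := ["2:30 pm", "3:30 pm", "4:30 pm", "5:30 pm", "6:30 pm"]
  let firsts := (preferences.filter (fun p => !p.2.isEmpty)).map (fun p => (p.1, PySem.List.pyGetD p.2 0 0))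
  let fsorted := PySem.List.sorted firsts (fun q => q.2) false
  [(PySem.List.enumerate fsorted 0).map (fun ip => ip.2.1 ++ " (" ++ PySem.List.pyGetD set_times ip.1 "" ++ ")")]

-- ===== PRECONDITION & SPEC =====
-- Pre_ excludes (a) association lists with duplicate DJ keys, which cannot arise from a Python dict
-- argument (a dict collapses them before A ever runs), and (b) inputs with more than five DJs having
-- a non-empty times list, on which A raises IndexError (set_times has five entries).
def Pre_generate_corrected_schedule_with_times (preferences : List (String × List Int)) : Prop :=
  (preferences.map Prod.fst).Nodup ∧ (preferences.filter (fun p => !p.2.isEmpty)).length ≤ 5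
instance (preferences : List (String × List Int)) : Decidable (Pre_generate_corrected_schedule_with_times preferences) := by unfold Pre_generate_corrected_schedule_with_times; infer_instance
def pvWitness_generate_corrected_schedule_with_times : (List (String × List Int)) := [("a", [2, 1]), ("b", [1]), ("c", [])]
def Spec_generate_corrected_schedule_with_times (preferences : List (String × List Int)) (out : List (List String)) : Prop := out = generate_corrected_schedule_with_times_alt preferences
instance (preferences : List (String × List Int)) (out : List (List String)) : Decidable (Spec_generate_corrected_schedule_with_times preferences out) := by unfold Spec_generate_corrected_schedule_with_times; infer_instance

-- ===== CLAIM (what is proved, stated in full; the proofs are below) =====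
def Claim_equal_generate_corrected_schedule_with_times : Prop := ∀ (preferences : List (String × List Int)), Dom_generate_corrected_schedule_with_times preferences → Pre_generate_corrected_schedule_with_times preferences → Spec_generate_corrected_schedule_with_times preferences (generate_corrected_schedule_with_times preferences)

-- ===== LEMMAS AND PROOFS =====

-- the lexicographic 'before' relation A's sorted2 uses, and the pair-embedding of B's firsts
def pvB2 (a b : String × Int × Int) : Bool :=
  decide (a.2.1 < b.2.1) || (!decide (b.2.1 < a.2.1) && decide (a.2.2 < b.2.2))
def pvH (q : String × Int) : String × Int × Int := (q.1, (0 : Int), q.2)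
def pvFl (preferences : List (String × List Int)) : List (String × Int × Int) :=
  preferences.flatMap (fun p => (PySem.List.enumerate p.2 0).map (fun rt => (p.1, rt.1, rt.2)))

theorem pv_sorted2_eq (fl : List (String × Int × Int)) :
    PySem.List.sorted2 fl (fun x => x.2.1) (fun x => x.2.2) false
      = fl.foldl (fun acc x => PySem.List.insertBy pvB2 x acc) [] := rfl

theorem pv_insertBy_front {α : Type} (b : α → α → Bool) (x : α) (zs rest : List α)
    (h : ∀ r ∈ rest, b x r = true) :
    PySem.List.insertBy b x (zs ++ rest) = PySem.List.insertBy b x zs ++ rest := by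
  induction zs with
  | nil =>
    cases rest with
    | nil => rfl
    | cons r rs => simp [PySem.List.insertBy, h r (by simp)]
  | cons z zs ih =>
    by_cases hb : b x z = true <;> simp [PySem.List.insertBy, hb, ih]

theorem pv_insertBy_back {α : Type} (b : α → α → Bool) (x : α) (zs rest : List α)
    (h : ∀ z ∈ zs, b x z = false) :
    PySem.List.insertBy b x (zs ++ rest) = zs ++ PySem.List.insertBy b x rest := by
  induction zs with
  | nil => rfl
  | cons z zs ih =>
    simp [PySem.List.insertBy, h z (by simp)]
    exact ih (fun z hz => h z (by simp [hz]))

theorem pv_mem_foldl_insertBy {α : Type} (b : α → α → Bool) (xs : List α) (acc : List α) (y : α) :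
    y ∈ xs.foldl (fun a x => PySem.List.insertBy b x a) acc ↔ y ∈ acc ∨ y ∈ xs := by
  induction xs generalizing acc with
  | nil => simp
  | cons x xs ih => simp [ih, PySem.List.mem_insertBy]; tauto

theorem pv_foldl_insertBy_partition {α : Type} (b : α → α → Bool) (p : α → Bool) (xs : List α)
    (h : ∀ x ∈ xs, ∀ y ∈ xs, p x = true → p y = false → b x y = true ∧ b y x = false) :
    xs.foldl (fun a x => PySem.List.insertBy b x a) [] =
      (xs.filter p).foldl (fun a x => PySem.List.insertBy b x a) []
        ++ (xs.filter (fun x => !p x)).foldl (fun a x => PySem.List.insertBy b x a) [] := by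
  induction xs using List.reverseRecOn with
  | nil => simp
  | append_singleton xs x ih =>
    have h' : ∀ x' ∈ xs, ∀ y ∈ xs, p x' = true → p y = false → b x' y = true ∧ b y x' = false :=
      fun x' hx' y hy => h x' (by simp [hx']) y (by simp [hy])
    rw [List.foldl_append, List.foldl_cons, List.foldl_nil, ih h',
        List.filter_append, List.filter_append]
    by_cases hp : p x = true
    · rw [pv_insertBy_front b x _ _ ?front]
      · simp [hp, List.foldl_append]
      case front =>
        intro r hr
        rw [pv_mem_foldl_insertBy] at hr
        simp at hr
        obtain ⟨hrmem, hrp⟩ := hr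
        exact (h x (by simp) r (by simp [hrmem]) hp (by simpa using hrp)).1
    · rw [pv_insertBy_back b x _ _ ?back]
      · simp [hp, List.foldl_append]
      case back =>
        intro z hz
        rw [pv_mem_foldl_insertBy] at hz
        simp at hz
        obtain ⟨hzmem, hzp⟩ := hz
        exact (h z (by simp [hzmem]) x (by simp) hzp (by simpa using hp)).2

theorem pv_rank_nonneg (preferences : List (String × List Int)) (x : String × Int × Int)
    (hx : x ∈ pvFl preferences) : 0 ≤ x.2.1 := by
  simp [pvFl] at hx
  obtain ⟨dj, ts, hmem, r, t, hx⟩ := hx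
  obtain ⟨hmemE, hxeq⟩ := hx
  rw [PySem.List.mem_enumerate_iff] at hmemE
  obtain ⟨k, hk, hrtk⟩ := hmemE
  subst hxeq
  simp at hrtk
  simp [hrtk.1]

theorem pv_fl_dj_mem (preferences : List (String × List Int)) (x : String × Int × Int)
    (hx : x ∈ pvFl preferences) :
    x.1 ∈ (preferences.filter (fun p => !p.2.isEmpty)).map Prod.fst := by
  simp [pvFl] at hx
  obtain ⟨dj, ts, hmem, r, t, hmemE, hxeq⟩ := hx
  have hne : ts ≠ [] := by rintro rfl; simp [PySem.List.enumerate] at hmemE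
  subst hxeq
  simp only [List.mem_map, List.mem_filter]
  exact ⟨(dj, ts), ⟨hmem, by simpa using hne⟩, rfl⟩

theorem pv_filter_rank0_tail (dj : String) (l : List Int) :
    ∀ s : Int, 1 ≤ s →
    ((PySem.List.enumerate l s).map (fun rt => (dj, rt.1, rt.2))).filter (fun x => x.2.1 == 0) = [] := by
  induction l with
  | nil => intro s _; simp [PySem.List.enumerate]
  | cons t ts ih =>
    intro s hs
    rw [PySem.List.enumerate_cons]
    simp only [List.map_cons, List.filter_cons]
    have h0 : ((s, t).1 == (0:Int)) = false := by simp; omega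
    simp only [h0]
    simpa using ih (s + 1) (by omega)

theorem pv_filter_rank0 (preferences : List (String × List Int)) :
    (pvFl preferences).filter (fun x => x.2.1 == 0)
      = ((preferences.filter (fun p => !p.2.isEmpty)).map (fun p => (p.1, PySem.List.pyGetD p.2 0 0))).map pvH := by
  induction preferences with
  | nil => simp [pvFl]
  | cons p ps ih =>
    obtain ⟨dj, ts⟩ := p
    simp only [pvFl, List.flatMap_cons, List.filter_append] at *
    rw [ih]
    cases ts with
    | nil => simp [PySem.List.enumerate]
    | cons t ts' =>
      rw [PySem.List.enumerate_cons]
      simp only [List.map_cons, List.filter_cons]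
      rw [pv_filter_rank0_tail dj ts' (0 + 1) (by omega)]
      simp [pvH, PySem.List.pyGetD_zero_cons]

theorem pv_insertBy_map (x : String × Int) (l : List (String × Int)) :
    PySem.List.insertBy pvB2 (pvH x) (l.map pvH)
      = (PySem.List.insertBy (fun a b => decide (a.2 < b.2)) x l).map pvH := by
  induction l with
  | nil => rfl
  | cons y ys ih =>
    have hb : pvB2 (pvH x) (pvH y) = decide (x.2 < y.2) := by simp [pvB2, pvH]
    by_cases hxy : x.2 < y.2 <;> simp [PySem.List.insertBy, hb, hxy, ih]

theorem pv_foldl_insertBy_map (l acc : List (String × Int)) :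
    (l.map pvH).foldl (fun a x => PySem.List.insertBy pvB2 x a) (acc.map pvH)
      = (l.foldl (fun a x => PySem.List.insertBy (fun a b => decide (a.2 < b.2)) x a) acc).map pvH := by
  induction l generalizing acc with
  | nil => rfl
  | cons x xs ih =>
    simp only [List.map_cons, List.foldl_cons, pv_insertBy_map]
    exact ih _

theorem pv_phase1 (l : List (String × Int)) :
    ∀ (s : PySem.Set String) (out : List String) (i : Int),
    (l.map Prod.fst).Nodup → (∀ q ∈ l, q.1 ∉ s) →
    (l.map pvH).foldl
      (fun (acc : PySem.Set String × List String × Int) x =>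
        if PySem.Set.contains acc.1 x.1 then acc
        else (PySem.Set.add acc.1 x.1,
              acc.2.1 ++ [x.1 ++ " (" ++ PySem.List.pyGetD ["2:30 pm", "3:30 pm", "4:30 pm", "5:30 pm", "6:30 pm"] acc.2.2 "" ++ ")"],
              acc.2.2 + 1)) (s, out, i)
      = (PySem.Set.update s (l.map Prod.fst),
         out ++ (PySem.List.enumerate l i).map (fun ip => ip.2.1 ++ " (" ++ PySem.List.pyGetD ["2:30 pm", "3:30 pm", "4:30 pm", "5:30 pm", "6:30 pm"] ip.1 "" ++ ")"),
         i + l.length) := by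
  induction l with
  | nil => intro s out i _ _; simp [PySem.Set.update]
  | cons q l ih =>
    intro s out i hnd hnotin
    have hq : q.1 ∉ s := hnotin q (by simp)
    have hcont : PySem.Set.contains s q.1 = false := by
      simpa using hq
    simp only [List.map_cons, List.foldl_cons, hcont, Bool.false_eq_true, if_false, pvH]
    rw [ih (PySem.Set.add s q.1) _ (i + 1) (by simpa using hnd.sublist (by simp))
          ?notin]
    · rw [PySem.Set.update_cons, PySem.List.enumerate_cons]
      simp; omega
    case notin =>
      intro q' hq'
      rw [PySem.Set.mem_add]
      push Not
      refine ⟨hnotin q' (by simp [hq']), ?_⟩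
      have := hnd
      simp only [List.map_cons, List.nodup_cons] at this
      intro hEq
      exact this.1 (hEq ▸ (List.mem_map_of_mem hq'))
    
theorem pv_phase2 (rest : List (String × Int × Int)) :
    ∀ (st : PySem.Set String × List String × Int),
    (∀ x ∈ rest, PySem.Set.contains st.1 x.1 = true) →
    rest.foldl
      (fun (acc : PySem.Set String × List String × Int) x =>
        if PySem.Set.contains acc.1 x.1 then acc
        else (PySem.Set.add acc.1 x.1,
              acc.2.1 ++ [x.1 ++ " (" ++ PySem.List.pyGetD ["2:30 pm", "3:30 pm", "4:30 pm", "5:30 pm", "6:30 pm"] acc.2.2 "" ++ ")"],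
              acc.2.2 + 1)) st = st := by
  induction rest with
  | nil => intro st _; rfl
  | cons x rest ih =>
    intro st h
    simp only [List.foldl_cons, h x (by simp)]
    exact ih st (fun y hy => h y (by simp [hy]))

theorem pv_foldl_insertBy_map0 (l : List (String × Int)) :
    (l.map pvH).foldl (fun a x => PySem.List.insertBy pvB2 x a) []
      = (l.foldl (fun a x => PySem.List.insertBy (fun a b => decide (a.2 < b.2)) x a) []).map pvH :=
  pv_foldl_insertBy_map l []

-- ===== VERDICT (by name: the statement is the Claim_ definition above) =====
theorem generate_corrected_schedule_with_times_spec : Claim_equal_generate_corrected_schedule_with_times := by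
  intro preferences _hdom hpre
  obtain ⟨hnodup, _⟩ := hpre
  unfold Spec_generate_corrected_schedule_with_times
  unfold generate_corrected_schedule_with_times generate_corrected_schedule_with_times_alt
  simp only []
  set firsts := (preferences.filter (fun p => !p.2.isEmpty)).map (fun p => (p.1, PySem.List.pyGetD p.2 0 0)) with hfirsts
  have hcond : ∀ x ∈ pvFl preferences, ∀ y ∈ pvFl preferences,
      ((fun z : String × Int × Int => z.2.1 == 0) x) = true → ((fun z : String × Int × Int => z.2.1 == 0) y) = false →
      pvB2 x y = true ∧ pvB2 y x = false := by
    intro x hx y hy hx0 hy0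
    have hyn := pv_rank_nonneg preferences y hy
    simp at hx0 hy0
    constructor <;> simp [pvB2, hx0] <;> omega
  have hsp : PySem.List.sorted2 (pvFl preferences) (fun x => x.2.1) (fun x => x.2.2) false
      = (PySem.List.sorted firsts (fun q => q.2) false).map pvH
        ++ ((pvFl preferences).filter (fun x => !(x.2.1 == 0))).foldl (fun a x => PySem.List.insertBy pvB2 x a) [] := by
    rw [pv_sorted2_eq, pv_foldl_insertBy_partition pvB2 (fun z => z.2.1 == 0) _ hcond,
        pv_filter_rank0, pv_foldl_insertBy_map0]
    rw [PySem.List.sorted_eq_foldl_insertBy firsts (fun q => q.2)]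
  have hndk : ((PySem.List.sorted firsts (fun q => q.2) false).map Prod.fst).Nodup := by
    have h1 : (PySem.List.sorted firsts (fun q => q.2) false).Perm firsts := PySem.List.sorted_perm _ _ _
    have h2 := (h1.map Prod.fst).nodup_iff
    rw [h2, hfirsts, List.map_map]
    have hsub : ((preferences.filter (fun p => !p.2.isEmpty)).map (Prod.fst ∘ fun p => (p.1, PySem.List.pyGetD p.2 0 0))).Sublist (preferences.map Prod.fst) := by
      simpa using ((preferences.filter_sublist (p := fun p => !p.2.isEmpty)).map (fun p => p.1))
    exact hnodup.sublist hsub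
  have hkeys : ∀ x ∈ (pvFl preferences).filter (fun z => !(z.2.1 == 0)),
      PySem.Set.contains (PySem.Set.update PySem.Set.empty ((PySem.List.sorted firsts (fun q => q.2) false).map Prod.fst)) x.1 = true := by
    intro x hx
    have hxfl : x ∈ pvFl preferences := (List.mem_filter.mp hx).1
    have hdj := pv_fl_dj_mem preferences x hxfl
    simp only [List.mem_map] at hdj
    obtain ⟨p, hp, hpx⟩ := hdj
    have hq : (p.1, PySem.List.pyGetD p.2 0 0) ∈ firsts := by
      rw [hfirsts]; exact List.mem_map_of_mem hp
    have hq' : (p.1, PySem.List.pyGetD p.2 0 0) ∈ PySem.List.sorted firsts (fun q => q.2) false := by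
      rw [PySem.List.mem_sorted]; exact hq
    rw [PySem.Set.contains_iff, PySem.Set.mem_update]
    right
    rw [List.mem_map]
    exact ⟨_, hq', hpx⟩
  rw [← pvFl.eq_def, hsp, List.foldl_append,
      pv_phase1 _ PySem.Set.empty [] 0 hndk (by simp [PySem.Set.empty]),
      pv_phase2 _ _ (fun x hx => hkeys x (((pv_mem_foldl_insertBy _ _ _ _).mp hx).resolve_left (by simp)))]
  simp
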